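-- pv_equiv track=rewrite | github.com/rajatsainju2025/autorag-live | autorag_live/prompts/builder.py | _optimize_conciseness
-- ===== SOURCE A (Python) =====
-- def _optimize_conciseness(prompt: str) -> str:
--     """Make prompt more concise."""
--     # Remove filler phrases
--     fillers = [
--         "I would like you to",
--         "Could you please",
--         "I want you to",
--         "Please help me",
--         "Can you help me",
--     ]
--
--     result = prompt
--     for filler in fillers:
--         result = result.replace(filler, "")
--
--     return " ".join(result.split())
-- ===== SOURCE B (Python) =====
-- def _optimize_conciseness(prompt: str) -> str:
--     """Make prompt more concise."""
--     fillers = (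
--         "I would like you to",
--         "Could you please",
--         "I want you to",
--         "Please help me",
--         "Can you help me",
--     )
--
--     def strip_fillers(s, fs):
--         if not fs:
--             return s
--         return strip_fillers("".join(s.split(fs[0])), fs[1:])
--
--     s = strip_fillers(prompt, fillers)
--
--     # single-pass whitespace normalization with a pending-space flag
--     out = []
--     pending = False
--     for ch in s:
--         if ch.isspace():
--             pending = bool(out)
--         else:
--             if pending:
--                 out.append(" ")
--                 pending = False
--             out.append(ch)
--     return "".join(out)
-- ===== Notes on version B (the rewrite author's own statement) =====
-- stated objective: alternative
-- what changed: Replaces the imperative five-pass str.replace loop by a recursive split-and-rejoin removal of each filler, and replaces the final space-join of result.split() by a single explicit pass over the characters with a pending-space flag accumulator.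
import Mathlib
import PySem

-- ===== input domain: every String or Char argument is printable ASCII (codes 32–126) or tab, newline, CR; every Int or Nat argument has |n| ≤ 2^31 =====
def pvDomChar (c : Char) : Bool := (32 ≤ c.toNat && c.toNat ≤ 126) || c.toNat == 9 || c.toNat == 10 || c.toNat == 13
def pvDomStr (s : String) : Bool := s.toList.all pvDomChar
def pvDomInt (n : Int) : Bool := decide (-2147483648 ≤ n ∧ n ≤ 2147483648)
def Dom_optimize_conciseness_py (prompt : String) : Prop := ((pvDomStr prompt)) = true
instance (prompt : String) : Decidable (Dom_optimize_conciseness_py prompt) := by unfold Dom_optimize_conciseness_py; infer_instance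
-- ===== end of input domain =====

-- B replaces the five-pass str.replace loop + split/join normalization by a recursive
-- split-and-rejoin filler removal and a single-pass pending-space whitespace machine
-- (objective: alternative decomposition, same asymptotic cost).

-- ===== PORT A =====
-- for filler in fillers: result = result.replace(filler, "");  return " ".join(result.split())
def optimize_conciseness_py (prompt : String) : String :=
  let fillers : List String :=
    ["I would like you to", "Could you please", "I want you to", "Please help me", "Can you help me"]
  let result := fillers.foldl (fun r f => PySem.Str.replace r f "") prompt
  PySem.Str.join " " (PySem.Str.split₀ result)

-- ===== PORT B =====
-- "".join(s.split(f)) for one filler f (f is a nonempty literal, so s.split(f) is exact via Chars.splitOn)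
def pvRemoveAllB (s : List Char) (f : List Char) : List Char :=
  PySem.Chars.join [] (PySem.Chars.splitOn s f)

-- recursive strip_fillers(s, fs)
def pvStripFillersB : List Char → List (List Char) → List Char
  | s, [] => s
  | s, f :: fs => pvStripFillersB (pvRemoveAllB s f) fs

-- loop body: whitespace sets the pending flag (only if output nonempty); other chars flush a
-- pending single space and are appended
def pvNormStepB (st : List Char × Bool) (c : Char) : List Char × Bool :=
  if PySem.Chars.isspace c then (st.1, !st.1.isEmpty)
  else ((if st.2 then st.1 ++ [' ', c] else st.1 ++ [c]), false)

def optimize_conciseness_py_alt (prompt : String) : String :=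
  let fillers : List (List Char) :=
    [("I would like you to" : String).toList, ("Could you please" : String).toList,
     ("I want you to" : String).toList, ("Please help me" : String).toList,
     ("Can you help me" : String).toList]
  let s := pvStripFillersB prompt.toList fillers
  String.ofList (s.foldl pvNormStepB ([], false)).1

-- ===== PRECONDITION & SPEC =====
def Spec_optimize_conciseness_py (prompt : String) (out : String) : Prop := out = optimize_conciseness_py_alt prompt
instance (prompt : String) (out : String) : Decidable (Spec_optimize_conciseness_py prompt out) := by unfold Spec_optimize_conciseness_py; infer_instance

-- ===== CLAIM (what is proved, stated in full; the proofs are below) =====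
def Claim_equal_optimize_conciseness_py : Prop := ∀ (prompt : String), Dom_optimize_conciseness_py prompt → Spec_optimize_conciseness_py prompt (optimize_conciseness_py prompt)

-- ===== LEMMAS AND PROOFS =====

-- what both removal passes compute: delete every (leftmost, non-overlapping) occurrence of sep
def pvRemSpec (sep : List Char) : Nat → List Char → List Char
  | 0, l => l
  | _ + 1, [] => []
  | fuel + 1, c :: t =>
    if sep.isPrefixOf (c :: t) then pvRemSpec sep fuel ((c :: t).drop sep.length)
    else c :: pvRemSpec sep fuel t

theorem replace_go_eq_remSpec (sep : List Char) :
    ∀ (fuel : Nat) (l acc : List Char),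
      PySem.Chars.replace.go sep [] fuel l acc = acc.reverse ++ pvRemSpec sep fuel l := by
  intro fuel
  induction fuel with
  | zero => intro l acc; simp [PySem.Chars.replace.go, pvRemSpec]
  | succ n ih =>
    intro l acc
    cases l with
    | nil => simp [PySem.Chars.replace.go, pvRemSpec]
    | cons c t =>
      rw [PySem.Chars.replace.go]
      by_cases h : sep.isPrefixOf (c :: t)
      · simp [h, pvRemSpec, ih]
      · simp [h, pvRemSpec, ih]

theorem splitOn_go_flatten (sep : List Char) :
    ∀ (fuel : Nat) (l cur : List Char) (accs : List (List Char)),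
      (PySem.Chars.splitOn.go sep fuel l cur accs).flatten =
        accs.reverse.flatten ++ cur.reverse ++ pvRemSpec sep fuel l := by
  intro fuel
  induction fuel with
  | zero => intro l cur accs; simp [PySem.Chars.splitOn.go, pvRemSpec]
  | succ n ih =>
    intro l cur accs
    cases l with
    | nil => simp [PySem.Chars.splitOn.go, pvRemSpec]
    | cons c t =>
      rw [PySem.Chars.splitOn.go]
      by_cases h : sep.isPrefixOf (c :: t)
      · simp [h, pvRemSpec, ih]
      · simp [h, pvRemSpec, ih]

theorem remSpec_fuel_irrelevant (sep : List Char) (hsep : sep ≠ []) :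
    ∀ (f1 f2 : Nat) (l : List Char), l.length ≤ f1 → l.length ≤ f2 →
      pvRemSpec sep f1 l = pvRemSpec sep f2 l := by
  intro f1
  induction f1 with
  | zero =>
    intro f2 l h1 _
    have : l = [] := List.eq_nil_of_length_eq_zero (Nat.le_zero.mp h1)
    subst this
    cases f2 <;> simp [pvRemSpec]
  | succ n ih =>
    intro f2 l h1 h2
    cases l with
    | nil => cases f2 <;> simp [pvRemSpec]
    | cons c t =>
      cases f2 with
      | zero => simp at h2
      | succ m =>
        by_cases h : sep.isPrefixOf (c :: t)
        · have hlen : sep.length ≤ (c :: t).length :=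
            (List.isPrefixOf_iff_prefix.mp h).length_le
          have hpos : 0 < sep.length := List.length_pos_of_ne_nil hsep
          have hd : ((c :: t).drop sep.length).length ≤ n := by
            simp only [List.length_drop]
            omega
          have hd2 : ((c :: t).drop sep.length).length ≤ m := by
            simp only [List.length_drop]
            omega
          simp [pvRemSpec, h, ih _ _ hd hd2]
        · have ht : t.length ≤ n := by simp at h1; omega
          have ht2 : t.length ≤ m := by simp at h2; omega
          simp [pvRemSpec, h, ih _ _ ht ht2]

-- join with the empty separator is flatten
theorem join_nil_eq_flatten (parts : List (List Char)) :
    PySem.Chars.join [] parts = parts.flatten := by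
  induction parts with
  | nil => rfl
  | cons a t ih =>
    cases t with
    | nil => simp [PySem.Chars.join, List.intercalate]
    | cons b t' =>
      simp only [PySem.Chars.join, List.intercalate, List.intersperse] at *
      simp_all

-- one filler pass: result.replace(f, "") = "".join(result.split(f))  (f nonempty)
theorem replace_eq_removeAll (sep : List Char) (hsep : sep ≠ []) (s : List Char) :
    PySem.Chars.replace s sep [] = pvRemoveAllB s sep := by
  have hE : sep.isEmpty = false := by simpa [List.isEmpty_eq_false_iff] using hsep
  unfold pvRemoveAllB PySem.Chars.replace PySem.Chars.splitOn
  rw [join_nil_eq_flatten, hE]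
  simp only [Bool.false_eq_true, if_false]
  rw [replace_go_eq_remSpec, splitOn_go_flatten]
  simp [remSpec_fuel_irrelevant sep hsep s.length (s.length + 1) s (le_refl _) (Nat.le_succ _)]

-- B's recursion over the filler list is A's foldl of replace
theorem stripFillers_eq_foldl :
    ∀ (fs : List (List Char)) (s : List Char), (∀ f ∈ fs, f ≠ []) →
      pvStripFillersB s fs = fs.foldl (fun r f => PySem.Chars.replace r f []) s := by
  intro fs
  induction fs with
  | nil => intro s _; simp [pvStripFillersB]
  | cons f t ih =>
    intro s h
    simp only [pvStripFillersB, List.foldl_cons]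
    rw [← replace_eq_removeAll f (h f (by simp)) s]
    exact ih _ (fun g hg => h g (by simp [hg]))

-- Str-level fold of replace computes the Chars-level fold
theorem foldl_replace_toList :
    ∀ (fs : List String) (s : String),
      (fs.foldl (fun r f => PySem.Str.replace r f "") s).toList =
        (fs.map String.toList).foldl (fun r f => PySem.Chars.replace r f []) s.toList := by
  intro fs
  induction fs with
  | nil => intro s; simp
  | cons f t ih =>
    intro s
    simp only [List.foldl_cons, List.map_cons]
    rw [ih]
    simp [PySem.Str.replace]

-- spaced join of the words collected so far
def pvW (accs : List (List Char)) : List Char := List.intercalate [' '] accs.reverse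

theorem intercalate_append_singleton (xs : List (List Char)) (w : List Char) :
    List.intercalate [' '] (xs ++ [w]) =
      if xs.isEmpty then w else List.intercalate [' '] xs ++ [' '] ++ w := by
  induction xs with
  | nil => simp [List.intercalate]
  | cons a t ih =>
    cases t with
    | nil => simp [List.intercalate, List.intersperse]
    | cons b t' =>
      simp only [List.cons_append, List.intercalate, List.intersperse] at *
      simp_all

theorem pvW_push (w : List Char) (accs : List (List Char)) :
    pvW (w :: accs) = pvW accs ++ (if accs.isEmpty then [] else [' ']) ++ w := by
  unfold pvW
  rw [List.reverse_cons, intercalate_append_singleton, List.isEmpty_reverse]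
  by_cases ha : accs.isEmpty
  · have : accs = [] := List.isEmpty_iff.mp ha
    subst this
    simp [List.intercalate]
  · simp [ha]

theorem pvW_ne_nil (accs : List (List Char)) (h3 : ∀ w ∈ accs, w ≠ []) (h : accs ≠ []) :
    pvW accs ≠ [] := by
  cases accs with
  | nil => exact absurd rfl h
  | cons a t =>
    rw [pvW_push]
    have ha : a ≠ [] := h3 a (by simp)
    simp [ha]

-- the whitespace machine computes " ".join(s.split()) — invariant over split₀.go's state
theorem norm_machine_eq_split₀_go :
    ∀ (l : List Char) (A : List Char) (p : Bool) (cur : List Char) (accs : List (List Char)),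
      A = pvW accs ++ (if cur.isEmpty then [] else (if accs.isEmpty then [] else [' ']) ++ cur.reverse) →
      p = (cur.isEmpty && !A.isEmpty) →
      (∀ w ∈ accs, w ≠ []) →
      (l.foldl pvNormStepB (A, p)).1 = List.intercalate [' '] (PySem.Chars.split₀.go l cur accs) := by
  intro l
  induction l with
  | nil =>
    intro A p cur accs h1 _ h3
    rw [PySem.Chars.split₀.go]
    by_cases hc : cur.isEmpty
    · simp only [hc, if_true, List.foldl_nil]
      simpa [hc, pvW] using h1
    · simp only [hc, if_false, List.foldl_nil]
      show A = pvW (cur.reverse :: accs)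
      rw [pvW_push]
      simpa [hc] using h1
  | cons c rest ih =>
    intro A p cur accs h1 h2 h3
    rw [PySem.Chars.split₀.go, List.foldl_cons]
    by_cases hsp : PySem.Chars.isspace c
    · simp only [hsp, if_true, pvNormStepB]
      by_cases hc : cur.isEmpty
      · have hcur : cur = [] := List.isEmpty_iff.mp hc
        subst hcur
        simp only [List.isEmpty_nil, if_true]
        exact ih A (!A.isEmpty) [] accs (by simpa using h1) (by simp) h3
      · simp only [hc, if_false]
        apply ih A (!A.isEmpty) [] (cur.reverse :: accs)
        · rw [pvW_push]
          simpa [hc] using h1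
        · simp
        · intro w hw
          rcases List.mem_cons.mp hw with hcw | hcw
          · subst hcw
            have hne : cur ≠ [] := by simpa [List.isEmpty_iff] using hc
            simp [List.reverse_eq_nil_iff, hne]
          · exact h3 w hcw
    · simp only [hsp, if_false, pvNormStepB, Bool.false_eq_true]
      by_cases hc : cur.isEmpty
      · have hcur : cur = [] := List.isEmpty_iff.mp hc
        subst hcur
        by_cases ha : accs.isEmpty
        · have : accs = [] := List.isEmpty_iff.mp ha
          subst this
          have hA : A = [] := by simpa [pvW, List.intercalate] using h1
          subst hA
          have hp : p = false := by simpa using h2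
          subst hp
          simp only [Bool.false_eq_true, if_false]
          apply ih [c] false [c] []
          · simp [pvW, List.intercalate]
          · simp
          · simp
        · have haccs : accs ≠ [] := by
            intro hnil; rw [hnil] at ha; exact ha (by simp)
          have hA : A = pvW accs := by simpa using h1
          have hAne : A ≠ [] := hA ▸ pvW_ne_nil accs h3 haccs
          have hp : p = true := by
            rw [h2]
            simp [List.isEmpty_eq_false_iff.mpr hAne]
          subst hp
          simp only [if_true]
          apply ih (A ++ [' ', c]) false [c] accs
          · simp [hA, ha]
          · simp
          · exact h3
      · have hp : p = false := by rw [h2]; simp [hc]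
        subst hp
        simp only [Bool.false_eq_true, if_false]
        apply ih (A ++ [c]) false (c :: cur) accs
        · rw [h1]
          simp [hc]
        · simp
        · exact h3

-- ===== VERDICT (by name: the statement is the Claim_ definition above) =====
set_option maxHeartbeats 400000 in
theorem optimize_conciseness_py_spec : Claim_equal_optimize_conciseness_py := by
  intro prompt _
  unfold Spec_optimize_conciseness_py optimize_conciseness_py optimize_conciseness_py_alt
  simp only []
  rw [PySem.Str.join, PySem.Str.split₀]
  refine congrArg String.ofList ?_
  rw [List.map_map]
  have hmap : ∀ (xs : List (List Char)), List.map (String.toList ∘ String.ofList) xs = xs := by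
    intro xs; apply List.map_id''; intro x; simp
  rw [hmap, foldl_replace_toList]
  have hfill : (["I would like you to", "Could you please", "I want you to",
      "Please help me", "Can you help me"] : List String).map String.toList =
      [("I would like you to" : String).toList, ("Could you please" : String).toList,
       ("I want you to" : String).toList, ("Please help me" : String).toList,
       ("Can you help me" : String).toList] := by
    simp
  rw [hfill, ← stripFillers_eq_foldl _ _ (by decide)]
  have hnorm := norm_machine_eq_split₀_go
    (pvStripFillersB prompt.toList
      [("I would like you to" : String).toList, ("Could you please" : String).toList,
       ("I want you to" : String).toList, ("Please help me" : String).toList,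
       ("Can you help me" : String).toList]) [] false [] []
    (by simp [pvW, List.intercalate]) (by simp) (by simp)
  rw [hnorm]
  rfl
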